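-- pv_equiv track=rewrite | github.com/254CARBON/meta | scripts/adapters/kubernetes_adapter.py | _find_primary_resource
-- ===== SOURCE A (Python) =====
-- from typing import Dict, List, Any, Optional
--
-- def _find_primary_resource(resources: List[Dict[str, Any]]) -> Optional[Dict[str, Any]]:
--     """Find the primary Kubernetes resource."""
--     if not resources:
--         return None
--
--     # Priority order for resource types
--     priority_order = ['Deployment', 'StatefulSet', 'DaemonSet', 'Service', 'Pod']
--
--     # Look for resources in priority order
--     for resource_type in priority_order:
--         for resource in resources:
--             if resource.get('kind') == resource_type:
--                 return resource
--
--     # Return the first resource if no priority match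
--     return resources[0]
-- ===== SOURCE B (Python) =====
-- from typing import Dict, List, Any, Optional
--
-- _PRIORITY = ['Deployment', 'StatefulSet', 'DaemonSet', 'Service', 'Pod']
--
--
-- def _rank(resource):
--     """Priority index of a resource's kind (len(_PRIORITY) if not a priority kind)."""
--     try:
--         return _PRIORITY.index(resource.get('kind'))
--     except ValueError:
--         return len(_PRIORITY)
--
--
-- def _find_primary_resource(resources: List[Dict[str, Any]]) -> Optional[Dict[str, Any]]:
--     """Find the primary Kubernetes resource."""
--     if not resources:
--         return None
--     # min is stable: the first resource with the minimal rank wins; if no kind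
--     # matches, every rank is equal and min returns resources[0].
--     return min(resources, key=_rank)
-- ===== Notes on version B (the rewrite author's own statement) =====
-- stated objective: simpler
-- what changed: Replaces A's nested scan (for each priority kind, rescan all resources) with a single stable min(resources, key=rank) pass, where rank is the kind's index in the priority list (len if absent): min's first-minimum rule reproduces both A's priority tie-breaking and its resources[0] fall-through.
import Mathlib
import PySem

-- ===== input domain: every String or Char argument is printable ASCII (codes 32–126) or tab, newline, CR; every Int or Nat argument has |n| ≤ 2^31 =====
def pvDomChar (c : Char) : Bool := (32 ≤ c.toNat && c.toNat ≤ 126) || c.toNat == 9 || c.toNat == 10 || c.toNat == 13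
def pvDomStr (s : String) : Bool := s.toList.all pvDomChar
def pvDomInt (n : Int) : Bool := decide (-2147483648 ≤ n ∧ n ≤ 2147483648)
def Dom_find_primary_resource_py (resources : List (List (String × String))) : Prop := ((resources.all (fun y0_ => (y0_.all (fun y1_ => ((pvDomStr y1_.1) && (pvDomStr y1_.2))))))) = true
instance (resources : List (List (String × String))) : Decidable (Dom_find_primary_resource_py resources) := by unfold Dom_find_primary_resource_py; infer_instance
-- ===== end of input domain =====

-- B replaces A's nested priority-then-resources scan by one stable minimum-by-rank pass (objective: simpler).

-- the priority list (A's local `priority_order`, B's module constant `_PRIORITY` — the same literal)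
def pvPriority : List String := ["Deployment", "StatefulSet", "DaemonSet", "Service", "Pod"]

-- resource.get('kind')
def pvKind (r : List (String × String)) : Option String := PySem.Dict.get? ⟨r⟩ "kind"

-- ===== PORT A =====
-- inner loop: `for resource in resources: if resource.get('kind') == resource_type: return resource`
def pvScanA (k : String) : List (List (String × String)) → Option (List (String × String))
  | [] => none
  | r :: rs => if pvKind r = some k then some r else pvScanA k rs

-- outer loop: `for resource_type in priority_order: …`
def pvOuterA : List String → List (List (String × String)) → Option (List (String × String))
  | [], _ => none
  | k :: ks, rs =>
    match pvScanA k rs with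
    | some r => some r
    | none => pvOuterA ks rs

def find_primary_resource_py (resources : List (List (String × String))) : Option (List (String × String)) :=
  match resources with
  | [] => none                -- if not resources: return None
  | r0 :: _ =>
    match pvOuterA pvPriority resources with
    | some r => some r
    | none => some r0         -- return resources[0]

-- ===== PORT B =====
-- _rank: _PRIORITY.index(resource.get('kind')), ValueError → len(_PRIORITY).
-- (resource.get('kind') = None is never in _PRIORITY, so .index raises → the except branch.)
def pvRank (r : List (String × String)) : Nat :=
  match pvKind r with
  | some k => (PySem.List.index? pvPriority k).getD pvPriority.length
  | none => pvPriority.length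

def find_primary_resource_py_alt (resources : List (List (String × String))) : Option (List (String × String)) :=
  match resources with
  | [] => none                      -- if not resources: return None
  | _ :: _ => PySem.List.min? resources pvRank   -- min(resources, key=_rank)

-- ===== PRECONDITION & SPEC =====
def Spec_find_primary_resource_py (resources : List (List (String × String))) (out : Option (List (String × String))) : Prop := out = find_primary_resource_py_alt resources
instance (resources : List (List (String × String))) (out : Option (List (String × String))) : Decidable (Spec_find_primary_resource_py resources out) := by unfold Spec_find_primary_resource_py; infer_instance

-- ===== CLAIM (what is proved, stated in full; the proofs are below) =====
def Claim_equal_find_primary_resource_py : Prop := ∀ (resources : List (List (String × String))), Dom_find_primary_resource_py resources → Spec_find_primary_resource_py resources (find_primary_resource_py resources)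

-- ===== LEMMAS AND PROOFS =====

-- first element of zero rank, under an arbitrary key (pvScanA seen through ranks)
def pvScanA' (key : List (String × String) → Nat) : List (List (String × String)) → Option (List (String × String))
  | [] => none
  | x :: t => if key x = 0 then some x else pvScanA' key t

-- rank relative to an arbitrary priority suffix (pvRank = pvRankK pvPriority)
def pvRankK (ks : List String) (r : List (String × String)) : Nat :=
  match pvKind r with
  | some k => (PySem.List.index? ks k).getD ks.length
  | none => ks.length

-- running minimum with an explicit (non-optional) accumulator
def pvMF (key : List (String × String) → Nat) (b : List (String × String)) : List (List (String × String)) → List (String × String)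
  | [] => b
  | x :: t => pvMF key (if key x < key b then x else b) t

lemma min?_cons_step (key : List (String × String) → Nat) (x y : List (String × String))
    (t : List (List (String × String))) :
    PySem.List.min? (x :: y :: t) key
      = PySem.List.min? ((if key y < key x then y else x) :: t) key := by
  by_cases h : key y < key x <;> simp [PySem.List.min?, List.foldl, h]

lemma min?_cons_pvMF (key : List (String × String) → Nat) :
    ∀ (t : List (List (String × String))) (x : List (String × String)),
    PySem.List.min? (x :: t) key = some (pvMF key x t) := by
  intro t
  induction t with
  | nil => intro x; simp [PySem.List.min?, List.foldl, pvMF]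
  | cons y t ih =>
    intro x
    rw [min?_cons_step, ih]
    rfl

lemma pvRankK_of_kind (ks : List String) (r : List (String × String)) (k' : String)
    (h : pvKind r = some k') : pvRankK ks r = (PySem.List.index? ks k').getD ks.length := by
  unfold pvRankK; rw [h]

lemma pvRankK_of_none (ks : List String) (r : List (String × String))
    (h : pvKind r = none) : pvRankK ks r = ks.length := by
  unfold pvRankK; rw [h]

lemma pvRankK_cons (k : String) (ks : List String) (r : List (String × String)) :
    pvRankK (k :: ks) r = if pvKind r = some k then 0 else pvRankK ks r + 1 := by
  cases h : pvKind r with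
  | none =>
    rw [pvRankK_of_none (k :: ks) r h, if_neg (by simp), pvRankK_of_none ks r h,
      List.length_cons]
  | some k' =>
    rw [pvRankK_of_kind (k :: ks) r k' h]
    by_cases hk : k = k'
    · subst hk
      rw [PySem.List.index?_cons_self, if_pos rfl]
      rfl
    · rw [PySem.List.index?_cons_of_ne ks hk,
        if_neg (fun hh => hk (Option.some.inj hh).symm),
        pvRankK_of_kind ks r k' h]
      cases hi : PySem.List.index? ks k' <;> simp [List.length_cons]

lemma pvRankK_cons_eq_zero_iff (k : String) (ks : List String) (r : List (String × String)) :
    pvRankK (k :: ks) r = 0 ↔ pvKind r = some k := by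
  rw [pvRankK_cons]
  by_cases h : pvKind r = some k <;> simp [h]

-- a zero-rank accumulator is never displaced
lemma pvMF_of_key_zero (key : List (String × String) → Nat) :
    ∀ (t : List (List (String × String))) (b : List (String × String)), key b = 0 → pvMF key b t = b := by
  intro t
  induction t with
  | nil => intro b _; rfl
  | cons x t ih =>
    intro b hb
    simp only [pvMF, hb, Nat.not_lt_zero]
    exact ih b hb

-- the first zero-rank element of the list wins against a nonzero accumulator
lemma pvMF_first_zero (key : List (String × String) → Nat) :
    ∀ (t : List (List (String × String))) (b r : List (String × String)), key b ≠ 0 →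
      pvScanA' key t = some r → pvMF key b t = r := by
  intro t
  induction t with
  | nil => intro b r _ h; simp [pvScanA'] at h
  | cons x t ih =>
    intro b r hb h
    simp only [pvScanA'] at h
    by_cases hx : key x = 0
    · rw [if_pos hx] at h
      cases h
      have : key x < key b := by omega
      simp only [pvMF, if_pos this]
      exact pvMF_of_key_zero key t x hx
    · rw [if_neg hx] at h
      simp only [pvMF]
      by_cases hlt : key x < key b
      · rw [if_pos hlt]; exact ih x r hx h
      · rw [if_neg hlt]; exact ih b r hb h

-- ranks that agree up to the same shift give the same running minimum
lemma pvMF_congr_shift (k1 k2 : List (String × String) → Nat) :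
    ∀ (t : List (List (String × String))) (b : List (String × String)),
      (∀ y ∈ b :: t, k1 y = k2 y + 1) → pvMF k1 b t = pvMF k2 b t := by
  intro t
  induction t with
  | nil => intro b _; rfl
  | cons x t ih =>
    intro b hall
    have hb := hall b (List.mem_cons_self)
    have hx := hall x (List.mem_cons_of_mem b List.mem_cons_self)
    have hrest : ∀ y ∈ x :: t, ∀ y' ∈ b :: x :: t, y = y' → k1 y = k2 y + 1 := by
      intro y hy y' _ _; exact hall y (List.mem_cons_of_mem b hy)
    have hcond : (k1 x < k1 b) ↔ (k2 x < k2 b) := by omega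
    simp only [pvMF]
    by_cases h : k2 x < k2 b
    · rw [if_pos (hcond.mpr h), if_pos h]
      exact ih x (fun y hy => hall y (List.mem_cons_of_mem b hy))
    · rw [if_neg (fun hh => h (hcond.mp hh)), if_neg h]
      refine ih b (fun y hy => hall y ?_)
      rcases List.mem_cons.mp hy with h' | h'
      · exact h' ▸ List.mem_cons_self
      · exact List.mem_cons_of_mem b (List.mem_cons_of_mem x h')

lemma pvScanA_eq_scan' (k : String) (ks : List String) :
    ∀ (t : List (List (String × String))),
      pvScanA k t = pvScanA' (pvRankK (k :: ks)) t := by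
  intro t
  induction t with
  | nil => rfl
  | cons x t ih =>
    simp only [pvScanA, pvScanA']
    by_cases h : pvKind x = some k
    · rw [if_pos h, if_pos ((pvRankK_cons_eq_zero_iff k ks x).mpr h)]
    · rw [if_neg h, if_neg (fun hh => h ((pvRankK_cons_eq_zero_iff k ks x).mp hh)), ih]

lemma pvScanA_none (k : String) :
    ∀ (t : List (List (String × String))), pvScanA k t = none → ∀ r ∈ t, pvKind r ≠ some k := by
  intro t
  induction t with
  | nil => intro _ r hr; simp at hr
  | cons x t ih =>
    intro h r hr
    simp only [pvScanA] at h
    by_cases hx : pvKind x = some k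
    · simp [hx] at h
    · rw [if_neg hx] at h
      rcases List.mem_cons.mp hr with hr | hr
      · subst hr; exact hx
      · exact ih h r hr

lemma pvRankK_nil (r : List (String × String)) : pvRankK [] r = 0 := by
  cases h : pvKind r with
  | none => rw [pvRankK_of_none [] r h]; rfl
  | some k' => rw [pvRankK_of_kind [] r k' h]; simp [PySem.List.index?_eq_idxOf?]

-- main bridge: A's priority chain over x :: t equals the running minimum by rank
lemma pvOuter_eq_pvMF :
    ∀ (ks : List String) (x : List (String × String)) (t : List (List (String × String))),
      (match pvOuterA ks (x :: t) with
        | some r => some r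
        | none => some x) = some (pvMF (pvRankK ks) x t) := by
  intro ks x t
  induction ks with
  | nil =>
    simp only [pvOuterA]
    rw [pvMF_of_key_zero _ t x (pvRankK_nil x)]
  | cons k ks ih =>
    simp only [pvOuterA]
    cases h : pvScanA k (x :: t) with
    | some r =>
      simp only []
      rw [pvScanA_eq_scan' k ks] at h
      simp only [pvScanA'] at h
      by_cases hx : pvRankK (k :: ks) x = 0
      · rw [if_pos hx] at h
        cases h
        rw [pvMF_of_key_zero _ t x hx]
      · rw [if_neg hx] at h
        rw [pvMF_first_zero _ t x r hx h]
    | none =>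
      have hall := pvScanA_none k _ h
      have hshift : ∀ y ∈ x :: t, pvRankK (k :: ks) y = pvRankK ks y + 1 := by
        intro y hy
        rw [pvRankK_cons, if_neg (hall y hy)]
      rw [pvMF_congr_shift _ _ t x hshift]
      simpa using ih

-- ===== VERDICT (by name: the statement is the Claim_ definition above) =====
lemma pvRank_eq : pvRank = pvRankK pvPriority := rfl

theorem find_primary_resource_py_spec : Claim_equal_find_primary_resource_py := by
  intro resources _
  unfold Spec_find_primary_resource_py
  cases resources with
  | nil => rfl
  | cons x t =>
    unfold find_primary_resource_py find_primary_resource_py_alt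
    rw [min?_cons_pvMF, pvRank_eq]
    exact pvOuter_eq_pvMF pvPriority x t
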